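-- pv_equiv track=rewrite | github.com/SaiKiran-02/ITER_SEM-3 | ML/ASSIGNMENT 04/QUESTION 08.py | separate_by_vowels
-- ===== SOURCE A (Python) =====
-- def separate_by_vowels(word):
--     vowels = 'aeiouAEIOU'
--     result = []
--     temp = ''
--
--     for char in word:
--         if char in vowels:
--             if temp:
--                 result.append(temp)
--                 temp = ''
--         else:
--             temp += char
--
--     if temp:
--         result.append(temp)
--
--     return result
-- ===== SOURCE B (Python) =====
-- def separate_by_vowels(word):
--     vowels = set('aeiouAEIOU')
--     result = []
--     i, n = 0, len(word)
--     while i < n: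
--         if word[i] in vowels:
--             i += 1
--         else:
--             j = i
--             while j < n and word[j] not in vowels:
--                 j += 1
--             result.append(word[i:j])
--             i = j
--     return result
-- ===== Notes on version B (the rewrite author's own statement) =====
-- stated objective: alternative
-- what changed: Replaced the per-character accumulator-and-flush loop with a two-pointer span scan that skips vowels and slices out each maximal consonant run directly.
import Mathlib
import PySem

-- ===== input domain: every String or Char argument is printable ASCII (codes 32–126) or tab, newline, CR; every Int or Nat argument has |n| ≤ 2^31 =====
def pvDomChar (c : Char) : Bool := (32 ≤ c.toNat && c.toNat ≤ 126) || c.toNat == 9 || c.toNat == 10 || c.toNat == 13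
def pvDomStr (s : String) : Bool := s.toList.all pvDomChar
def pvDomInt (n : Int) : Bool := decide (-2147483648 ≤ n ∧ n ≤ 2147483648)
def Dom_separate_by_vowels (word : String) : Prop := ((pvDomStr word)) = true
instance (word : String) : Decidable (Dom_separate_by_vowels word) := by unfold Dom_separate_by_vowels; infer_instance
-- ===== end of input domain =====

-- B replaces A's per-character accumulator/flush loop with a two-pointer span scan slicing out
-- each maximal consonant run (alternative decomposition; same results).


-- ===== PORT A =====
def sbvIsVowel (c : Char) : Bool := "aeiouAEIOU".toList.contains c

def sbvStep (acc : List String × String) (c : Char) : List String × String :=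
  if sbvIsVowel c then
    (if acc.2 ≠ "" then (acc.1 ++ [acc.2], "") else (acc.1, ""))
  else (acc.1, acc.2.push c)

def separate_by_vowels (word : String) : List String :=
  let p := word.toList.foldl sbvStep ([], "")
  if p.2 ≠ "" then p.1 ++ [p.2] else p.1

-- ===== PORT B =====
-- inner while loop = take/drop the maximal non-vowel span starting at i; outer while loop = this recursion
def sbvGo : List Char → List String
  | [] => []
  | c :: rest =>
    if h : sbvIsVowel c then sbvGo rest
    else
      String.ofList ((c :: rest).takeWhile (fun x => !sbvIsVowel x)) ::
        sbvGo ((c :: rest).dropWhile (fun x => !sbvIsVowel x))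
termination_by cs => cs.length
decreasing_by
  · simp
  · simp only [List.dropWhile, h, Bool.not_false]
    exact Nat.lt_succ_of_le (List.length_dropWhile_le _ _)

def separate_by_vowels_alt (word : String) : List String := sbvGo word.toList

-- ===== PRECONDITION & SPEC =====
def Spec_separate_by_vowels (word : String) (out : List String) : Prop := out = separate_by_vowels_alt word
instance (word : String) (out : List String) : Decidable (Spec_separate_by_vowels word out) := by unfold Spec_separate_by_vowels; infer_instance

-- ===== CLAIM (what is proved, stated in full; the proofs are below) =====
def Claim_equal_separate_by_vowels : Prop := ∀ (word : String), Dom_separate_by_vowels word → Spec_separate_by_vowels word (separate_by_vowels word)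

-- ===== LEMMAS AND PROOFS =====

theorem sbv_take_all (u : List Char) (hu : ∀ x ∈ u, sbvIsVowel x = false) :
    u.takeWhile (fun x => !sbvIsVowel x) = u ∧ u.dropWhile (fun x => !sbvIsVowel x) = [] := by
  induction u with
  | nil => simp
  | cons b u' ih =>
    have hb : sbvIsVowel b = false := hu b (by simp)
    have := ih (fun x hx => hu x (by simp [hx]))
    simp [List.takeWhile, List.dropWhile, hb, this.1, this.2]

theorem sbv_span (u : List Char) (c : Char) (cs : List Char)
    (hu : ∀ x ∈ u, sbvIsVowel x = false) (hc : sbvIsVowel c = true) :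
    (u ++ c :: cs).takeWhile (fun x => !sbvIsVowel x) = u ∧
    (u ++ c :: cs).dropWhile (fun x => !sbvIsVowel x) = c :: cs := by
  induction u with
  | nil => simp [List.takeWhile, List.dropWhile, hc]
  | cons b u' ih =>
    have hb : sbvIsVowel b = false := hu b (by simp)
    have := ih (fun x hx => hu x (by simp [hx]))
    simp [List.takeWhile, List.dropWhile, hb, this.1, this.2]

theorem sbv_go_all (u : List Char) (hu : ∀ x ∈ u, sbvIsVowel x = false) (hne : u ≠ []) :
    sbvGo u = [String.ofList u] := by
  obtain ⟨a, t', rfl⟩ := List.exists_cons_of_ne_nil hne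
  have ha : sbvIsVowel a = false := hu a (by simp)
  rw [sbvGo, dif_neg (by simp [ha]), (sbv_take_all _ hu).1, (sbv_take_all _ hu).2, sbvGo]

theorem sbv_go_cons_run (t : List Char) (c : Char) (cs : List Char)
    (ht : ∀ x ∈ t, sbvIsVowel x = false) (hne : t ≠ []) (hc : sbvIsVowel c = true) :
    sbvGo (t ++ c :: cs) = String.ofList t :: sbvGo cs := by
  obtain ⟨a, t', rfl⟩ := List.exists_cons_of_ne_nil hne
  have ha : sbvIsVowel a = false := ht a (by simp)
  rw [List.cons_append, sbvGo, dif_neg (by simp [ha]), ← List.cons_append,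
    (sbv_span _ c cs ht hc).1, (sbv_span _ c cs ht hc).2, sbvGo, dif_pos hc]

theorem sbv_go_vowel (c : Char) (cs : List Char) (hc : sbvIsVowel c = true) :
    sbvGo (c :: cs) = sbvGo cs := by
  rw [sbvGo, dif_pos hc]

theorem sbv_main (cs : List Char) : ∀ (r : List String) (s : String),
    (∀ x ∈ s.toList, sbvIsVowel x = false) →
    (let p := cs.foldl sbvStep (r, s)
     if p.2 ≠ "" then p.1 ++ [p.2] else p.1) = r ++ sbvGo (s.toList ++ cs) := by
  induction cs with
  | nil =>
    intro r s hs
    by_cases hne : s = ""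
    · subst hne; simp [sbvGo]
    · have hl : s.toList ≠ [] := by
        simpa [String.toList_eq_nil_iff] using hne
      simp only [List.foldl_nil, List.append_nil, sbv_go_all s.toList hs hl,
        String.ofList_toList]
      simp [hne]
  | cons c cs' ih =>
    intro r s hs
    simp only [List.foldl_cons]
    by_cases hc : sbvIsVowel c = true
    · by_cases hne : s = ""
      · subst hne
        have hstep : sbvStep (r, "") c = (r, "") := by simp [sbvStep, hc]
        rw [hstep, ih r "" (by simp)]
        simp [sbv_go_vowel c cs' hc]
      · have hstep : sbvStep (r, s) c = (r ++ [s], "") := by simp [sbvStep, hc, hne]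
        have hl : s.toList ≠ [] := by simpa [String.toList_eq_nil_iff] using hne
        rw [hstep, ih (r ++ [s]) "" (by simp),
          sbv_go_cons_run s.toList c cs' hs hl hc, String.ofList_toList]
        simp
    · have hc' : sbvIsVowel c = false := by simpa using hc
      have hstep : sbvStep (r, s) c = (r, s.push c) := by simp [sbvStep, hc']
      rw [hstep, ih r (s.push c) (by
        intro x hx
        rw [String.toList_push] at hx
        rcases List.mem_append.mp hx with h | h
        · exact hs x h
        · simp at h; subst h; exact hc')]
      simp [String.toList_push]

-- ===== VERDICT (by name: the statement is the Claim_ definition above) =====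
theorem separate_by_vowels_spec : Claim_equal_separate_by_vowels := by
  intro word _
  unfold Spec_separate_by_vowels separate_by_vowels separate_by_vowels_alt
  have := sbv_main word.toList [] "" (by simp)
  simpa using this
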